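-- pv_equiv track=rewrite | github.com/JamesJava42/SmartRide | infra/scripts/backfill_driver_onboarding_data.py | fallback_name
-- ===== SOURCE A (Python) =====
-- def fallback_name(email: str | None, phone_number: str | None) -> str:
--     if email and "@" in email:
--         seed = email.split("@", 1)[0]
--     elif phone_number:
--         seed = phone_number
--     else:
--         seed = "driver"
--     cleaned = "".join(ch if ch.isalnum() else " " for ch in seed).strip() or "driver"
--     parts = [part.capitalize() for part in cleaned.split() if part]
--     return parts[0] if parts else "Driver"
-- ===== SOURCE B (Python) =====
-- def fallback_name(email, phone_number):
--     if email and "@" in email: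
--         seed = email[:email.index("@")]
--     elif phone_number:
--         seed = phone_number
--     else:
--         seed = "driver"
--     # One fused pass: collect the first alphanumeric run, already capitalized.
--     out = []
--     for ch in seed:
--         if ch.isalnum():
--             out.append(ch.upper() if not out else ch.lower())
--         elif out:
--             break
--     return "".join(out) if out else "Driver"
-- ===== Notes on version B (the rewrite author's own statement) =====
-- stated objective: alternative
-- what changed: Replaces A's staged clean/strip/split/capitalize-every-part pipeline with one fused accumulator loop that collects the first alphanumeric run already capitalized (first char uppered, later chars lowered) and breaks at the run's end; the email local part is taken via index('@') and a slice instead of split.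
import Mathlib
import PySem

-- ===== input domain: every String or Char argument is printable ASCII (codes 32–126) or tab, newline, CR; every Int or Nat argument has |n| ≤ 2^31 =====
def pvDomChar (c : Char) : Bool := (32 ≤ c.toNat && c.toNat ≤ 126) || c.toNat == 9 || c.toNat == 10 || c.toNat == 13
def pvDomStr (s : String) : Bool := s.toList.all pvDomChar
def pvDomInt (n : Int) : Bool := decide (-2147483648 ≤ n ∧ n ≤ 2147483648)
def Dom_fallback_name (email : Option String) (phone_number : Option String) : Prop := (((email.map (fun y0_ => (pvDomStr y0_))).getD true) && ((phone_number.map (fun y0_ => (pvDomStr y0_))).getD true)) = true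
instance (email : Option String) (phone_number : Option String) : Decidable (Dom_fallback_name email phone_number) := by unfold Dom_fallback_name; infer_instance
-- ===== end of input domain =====

-- B replaces A's staged clean/strip/split/capitalize-all-parts pipeline by ONE fused pass:
-- an accumulator loop that collects the first alphanumeric run, already capitalized, and
-- stops at the run's end (objective: alternative decomposition; same cost).

-- helper of port A: Python str.capitalize (exact on ASCII): first char upper, rest lower
def pyCapitalize (cs : List Char) : List Char :=
  match cs with
  | [] => []
  | c :: t => PySem.Chars.upperChar c :: t.map PySem.Chars.lowerChar

-- ===== PORT A =====
def fallback_name (email : Option String) (phone_number : Option String) : String :=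
  let seed : List Char :=
    if (match email with
        | some e => (!(e == "")) && PySem.Str.isIn "@" e
        | none => false) then
      (PySem.Chars.splitOnMax (email.getD "").toList ['@'] 1).headD []
    else if (match phone_number with
        | some p => !(p == "")
        | none => false) then
      (phone_number.getD "").toList
    else "driver".toList
  let cleaned0 := seed.map (fun ch => if PySem.Chars.isalnum ch then ch else ' ')
  let cleaned := PySem.Chars.strip cleaned0
  let cleaned := if cleaned.isEmpty then "driver".toList else cleaned
  let parts := ((PySem.Chars.split₀ cleaned).filter (fun p => !p.isEmpty)).map pyCapitalize
  match parts with
  | [] => "Driver"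
  | p :: _ => String.ofList p

-- ===== PORT B =====
-- seed = phone_number if nonempty else "driver"  (the elif/else tail of B's chain)
def pvSeedPhone : Option String → List Char
  | some p => if p.toList = [] then "driver".toList else p.toList
  | none => "driver".toList

-- seed: email's local part via index("@") and a slice, else the phone/driver tail
def pvSeedB : Option String → Option String → List Char
  | some e, p =>
      if e.toList ≠ [] ∧ '@' ∈ e.toList then
        PySem.List.slice e.toList none (some (((PySem.List.index? e.toList '@').getD 0 : Nat) : Int))
      else pvSeedPhone p
  | none, p => pvSeedPhone p

-- the fused loop: append alnum chars (first upper-cased, later ones lower-cased),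
-- break at the first non-alnum char once the run is nonempty
def pvRunGo : List Char → List Char → List Char
  | [], out => out
  | c :: t, out =>
      if PySem.Chars.isalnum c then
        pvRunGo t (out ++ [if out.isEmpty then PySem.Chars.upperChar c else PySem.Chars.lowerChar c])
      else if out.isEmpty then pvRunGo t out else out

def fallback_name_alt (email : Option String) (phone_number : Option String) : String :=
  let out := pvRunGo (pvSeedB email phone_number) []
  if out = [] then "Driver" else String.ofList out

-- ===== PRECONDITION & SPEC =====
def Spec_fallback_name (email : Option String) (phone_number : Option String) (out : String) : Prop := out = fallback_name_alt email phone_number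
instance (email : Option String) (phone_number : Option String) (out : String) : Decidable (Spec_fallback_name email phone_number out) := by unfold Spec_fallback_name; infer_instance

-- ===== CLAIM (what is proved, stated in full; the proofs are below) =====
def Claim_equal_fallback_name : Prop := ∀ (email : Option String) (phone_number : Option String), Dom_fallback_name email phone_number → Spec_fallback_name email phone_number (fallback_name email phone_number)

-- ===== LEMMAS AND PROOFS =====

lemma alnum_not_space (c : Char) (h : PySem.Chars.isalnum c = true) :
    PySem.Chars.isspace c = false := by
  simp [PySem.Chars.isalnum, PySem.Chars.isalpha, PySem.Chars.isdigit,
        PySem.Chars.isupper, PySem.Chars.islower, Char.le_def,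
        UInt32.le_iff_toNat_le] at h
  simp only [PySem.Chars.isspace, Char.toNat]
  simp
  omega

lemma dropWhile_append_singleton {p : Char → Bool} (l : List Char) (c : Char)
    (hc : p c = false) : List.dropWhile p (l ++ [c]) = List.dropWhile p l ++ [c] := by
  induction l with
  | nil => simp [List.dropWhile, hc]
  | cons x t ih =>
      by_cases hx : p x = true
      · simp [List.dropWhile, hx, ih]
      · simp at hx; simp [List.dropWhile, hx]

lemma rstrip_cons_nonspace (c : Char) (z : List Char)
    (hc : PySem.Chars.isspace c = false) :
    PySem.Chars.rstrip (c :: z) = c :: PySem.Chars.rstrip z := by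
  unfold PySem.Chars.rstrip
  rw [show (c :: z).reverse = z.reverse ++ [c] from by simp,
      dropWhile_append_singleton z.reverse c hc]
  simp

lemma go_acc (s : List Char) : ∀ (cur : List Char) (acc : List (List Char)),
    PySem.Chars.split₀.go s cur acc = acc.reverse ++ PySem.Chars.split₀.go s cur [] := by
  induction s with
  | nil =>
      intro cur acc
      by_cases hc : cur.isEmpty
      · simp [PySem.Chars.split₀.go, hc]
      · simp [PySem.Chars.split₀.go, hc]
  | cons c rest ih =>
      intro cur acc
      by_cases hs : PySem.Chars.isspace c = true
      · by_cases hc : cur.isEmpty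
        · simp only [PySem.Chars.split₀.go, hs, hc, if_true]
          exact ih [] acc
        · simp only [PySem.Chars.split₀.go, hs, hc, if_true, if_false, Bool.false_eq_true]
          rw [ih [] (cur.reverse :: acc), ih [] [cur.reverse]]
          simp
      · simp only [PySem.Chars.split₀.go, hs, Bool.false_eq_true, if_false]
        rw [ih (c :: cur) acc]

lemma space_of_blank (c : Char) :
    PySem.Chars.isspace (if PySem.Chars.isalnum c then c else ' ') = !PySem.Chars.isalnum c := by
  by_cases h : PySem.Chars.isalnum c = true
  · simp [h, alnum_not_space c h]
  · simp at h
    simp [h]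
    decide

lemma takeWhile_rstrip_head_space (x : Char) (l : List Char)
    (hx : PySem.Chars.isspace x = true) :
    (PySem.Chars.rstrip (x :: l)).takeWhile (fun c => !PySem.Chars.isspace c) = [] := by
  unfold PySem.Chars.rstrip
  rcases hd : List.dropWhile PySem.Chars.isspace (x :: l).reverse with _ | ⟨a, t⟩
  · simp
  · have hsuff : (a :: t) <:+ (x :: l).reverse := by
      rw [← hd]; exact List.dropWhile_suffix _
    have hlast : (a :: t).getLast? = ((x :: l).reverse).getLast? := by
      obtain ⟨pre, hpre⟩ := hsuff
      rw [← hpre]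
      rcases t with _ | ⟨t0, ts⟩
      · simp [List.getLast?_append]
      · rw [List.getLast?_append]
        have hsome : ((a :: t0 :: ts).getLast?).isSome := by
          simp [List.getLast?_isSome]
        rw [Option.or_of_isSome hsome]
    have hx' : ((a :: t).reverse).head? = some x := by
      rw [List.head?_reverse, hlast, List.getLast?_reverse]
      simp
    rcases hr : (a :: t).reverse with _ | ⟨b, tb⟩
    · simp at hr
    · rw [hr] at hx'
      simp only [List.head?_cons, Option.some.injEq] at hx'
      subst hx'
      simp [List.takeWhile, hx]

lemma takeWhile_rstrip (l : List Char) :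
    (PySem.Chars.rstrip l).takeWhile (fun c => !PySem.Chars.isspace c)
      = l.takeWhile (fun c => !PySem.Chars.isspace c) := by
  induction l with
  | nil => simp [PySem.Chars.rstrip]
  | cons x t ih =>
      by_cases hx : PySem.Chars.isspace x = true
      · rw [takeWhile_rstrip_head_space x t hx]
        simp [List.takeWhile, hx]
      · simp at hx
        rw [rstrip_cons_nonspace x t hx]
        simp [List.takeWhile, hx, ih]

lemma go_head_cur (s : List Char) : ∀ (cur : List Char), cur ≠ [] →
    (PySem.Chars.split₀.go s cur []).head?
      = some (cur.reverse ++ s.takeWhile (fun c => !PySem.Chars.isspace c)) := by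
  induction s with
  | nil =>
      intro cur hcur
      have h1 : cur.isEmpty = false := by simpa [List.isEmpty_iff] using hcur
      simp [PySem.Chars.split₀.go, h1]
  | cons c rest ih =>
      intro cur hcur
      by_cases hs : PySem.Chars.isspace c = true
      · have h1 : cur.isEmpty = false := by simpa [List.isEmpty_iff] using hcur
        simp only [PySem.Chars.split₀.go, hs, h1, if_true, Bool.false_eq_true, if_false]
        rw [go_acc rest [] [cur.reverse]]
        simp [List.takeWhile, hs]
      · simp only [PySem.Chars.split₀.go, hs, Bool.false_eq_true, if_false]
        rw [ih (c :: cur) (by simp)]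
        simp [List.takeWhile, hs]

lemma split₀_head (s : List Char) :
    (PySem.Chars.split₀ s).head?
      = (if s.dropWhile PySem.Chars.isspace = [] then none
         else some ((s.dropWhile PySem.Chars.isspace).takeWhile (fun c => !PySem.Chars.isspace c))) := by
  induction s with
  | nil => simp [PySem.Chars.split₀, PySem.Chars.split₀.go]
  | cons c rest ih =>
      by_cases hs : PySem.Chars.isspace c = true
      · have h1 : PySem.Chars.split₀ (c :: rest) = PySem.Chars.split₀ rest := by
          simp [PySem.Chars.split₀, PySem.Chars.split₀.go, hs]
        rw [h1, ih]
        simp [List.dropWhile, hs]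
      · simp only [PySem.Chars.split₀]
        unfold PySem.Chars.split₀.go
        simp only [hs, Bool.false_eq_true, if_false]
        rw [go_head_cur rest [c] (by simp)]
        simp [List.dropWhile, hs]

lemma takeWhile_map_blank (z : List Char) :
    ((z.map (fun ch => if PySem.Chars.isalnum ch then ch else ' ')).takeWhile
        (fun c => !PySem.Chars.isspace c))
      = z.takeWhile PySem.Chars.isalnum := by
  induction z with
  | nil => simp
  | cons x t ih =>
      by_cases hx : PySem.Chars.isalnum x = true
      · simp [List.takeWhile, hx, alnum_not_space x hx, ih]
      · simp at hx
        simp [List.takeWhile, hx, (by decide : PySem.Chars.isspace ' ' = true)]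

lemma core (seed : List Char) :
    (let cleaned0 := seed.map (fun ch => if PySem.Chars.isalnum ch then ch else ' ')
     let cleaned := PySem.Chars.strip cleaned0
     let cleaned := if cleaned.isEmpty then "driver".toList else cleaned
     let parts := ((PySem.Chars.split₀ cleaned).filter (fun p => !p.isEmpty)).map pyCapitalize
     match parts with
     | [] => "Driver"
     | p :: _ => String.ofList p)
    = (let run := (seed.dropWhile (fun c => !PySem.Chars.isalnum c)).takeWhile PySem.Chars.isalnum
       if run.isEmpty then "Driver" else String.ofList (pyCapitalize run)) := by
  simp only []
  rcases hd : seed.dropWhile (fun c => !PySem.Chars.isalnum c) with _ | ⟨c, d₂⟩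
  · -- no alphanumeric character in seed
    have hall : ∀ x ∈ seed, PySem.Chars.isalnum x = false := by
      intro x hx
      have := (List.dropWhile_eq_nil_iff).1 hd x hx
      simpa using this
    have hstrip : PySem.Chars.strip
        (seed.map (fun ch => if PySem.Chars.isalnum ch then ch else ' ')) = [] := by
      have hl : (seed.map (fun ch => if PySem.Chars.isalnum ch then ch else ' ')).dropWhile
          PySem.Chars.isspace = [] := by
        rw [List.dropWhile_eq_nil_iff]
        intro x hx
        obtain ⟨y, hy, rfl⟩ := List.mem_map.1 hx
        rw [space_of_blank, hall y hy]
        rfl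
      unfold PySem.Chars.strip PySem.Chars.lstrip
      rw [hl]
      rfl
    rw [hstrip]
    decide
  · -- first alphanumeric run is c :: d₂.takeWhile isalnum
    have hc : PySem.Chars.isalnum c = true := by
      have hne' : List.dropWhile (fun c => !PySem.Chars.isalnum c) seed ≠ [] := by
        rw [hd]; simp
      have h1 := List.head_dropWhile_not (fun c => !PySem.Chars.isalnum c) (l := seed) hne'
      simp only [hd, List.head_cons] at h1
      simpa using h1
    have hcsp : PySem.Chars.isspace c = false := alnum_not_space c hc
    have hseed : seed = seed.takeWhile (fun c => !PySem.Chars.isalnum c) ++ (c :: d₂) := by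
      rw [← hd, List.takeWhile_append_dropWhile]
    set f : Char → Char := fun ch => if PySem.Chars.isalnum ch then ch else ' ' with hf
    have hfc : f c = c := by simp [hf, hc]
    have hlstrip : (seed.map f).dropWhile PySem.Chars.isspace = (c :: d₂).map f := by
      conv_lhs => rw [hseed]
      rw [List.map_append, List.dropWhile_append]
      have hpre : ((seed.takeWhile (fun c => !PySem.Chars.isalnum c)).map f).dropWhile
          PySem.Chars.isspace = [] := by
        rw [List.dropWhile_eq_nil_iff]
        intro x hx
        obtain ⟨y, hy, rfl⟩ := List.mem_map.1 hx
        have hy' : PySem.Chars.isalnum y = false := by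
          have := List.mem_takeWhile_imp hy
          simpa using this
        rw [hf]
        simp only []
        rw [space_of_blank, hy']
        rfl
      rw [hpre]
      simp [hfc, hcsp]
    have hcleaned : PySem.Chars.strip (seed.map f)
        = c :: PySem.Chars.rstrip (d₂.map f) := by
      unfold PySem.Chars.strip PySem.Chars.lstrip
      rw [hlstrip]
      simp only [List.map_cons, hfc]
      exact rstrip_cons_nonspace c (d₂.map f) hcsp
    rw [hcleaned]
    have hne : ((c :: PySem.Chars.rstrip (d₂.map f)).isEmpty) = false := rfl
    rw [hne]
    simp only [Bool.false_eq_true, if_false]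
    have hhead : (PySem.Chars.split₀ (c :: PySem.Chars.rstrip (d₂.map f))).head?
        = some (c :: d₂.takeWhile PySem.Chars.isalnum) := by
      rw [split₀_head]
      have hdw : (c :: PySem.Chars.rstrip (d₂.map f)).dropWhile PySem.Chars.isspace
          = c :: PySem.Chars.rstrip (d₂.map f) := by
        simp [List.dropWhile, hcsp]
      rw [hdw]
      rw [if_neg (by simp)]
      have h2 : (c :: PySem.Chars.rstrip (d₂.map f)).takeWhile (fun c => !PySem.Chars.isspace c)
          = c :: d₂.takeWhile PySem.Chars.isalnum := by
        simp only [List.takeWhile, hcsp, Bool.not_false]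
        rw [takeWhile_rstrip (d₂.map f), takeWhile_map_blank]
      rw [h2]
    rcases hsp : PySem.Chars.split₀ (c :: PySem.Chars.rstrip (d₂.map f)) with _ | ⟨p, tail⟩
    · rw [hsp] at hhead; simp at hhead
    · rw [hsp] at hhead
      simp only [List.head?_cons, Option.some.injEq] at hhead
      subst hhead
      simp [List.filter, List.takeWhile, hc]

-- ---- B-side lemmas: the fused loop computes pyCapitalize of the first alnum run ----

lemma runGo_nonempty (t : List Char) : ∀ (out : List Char), out ≠ [] →
    pvRunGo t out = out ++ (t.takeWhile PySem.Chars.isalnum).map PySem.Chars.lowerChar := by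
  induction t with
  | nil => intro out _; simp [pvRunGo]
  | cons c rest ih =>
      intro out hout
      have hoe : out.isEmpty = false := by simpa [List.isEmpty_iff] using hout
      by_cases hc : PySem.Chars.isalnum c = true
      · simp only [pvRunGo, hc, if_true, hoe, Bool.false_eq_true, if_false]
        rw [ih (out ++ [PySem.Chars.lowerChar c]) (by simp)]
        simp [List.takeWhile, hc]
      · simp at hc
        simp [pvRunGo, hc, hoe, List.takeWhile]

lemma runGo_capitalize (l : List Char) :
    pvRunGo l []
      = pyCapitalize ((l.dropWhile (fun c => !PySem.Chars.isalnum c)).takeWhile PySem.Chars.isalnum) := by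
  induction l with
  | nil => simp [pvRunGo, pyCapitalize]
  | cons c rest ih =>
      by_cases hc : PySem.Chars.isalnum c = true
      · simp only [pvRunGo, hc, if_true, List.isEmpty_nil, List.nil_append]
        rw [runGo_nonempty rest [PySem.Chars.upperChar c] (by simp)]
        simp [List.dropWhile, hc, pyCapitalize]
      · simp at hc
        simp only [pvRunGo, hc, Bool.false_eq_true, if_false, List.isEmpty_nil, if_true]
        rw [ih]
        simp [List.dropWhile, hc]

-- ---- seed-equality lemmas ----

lemma splitOnMax_go_zero (f : Nat) (l : List Char) (p : List Char) :
    (PySem.Chars.splitOnMax.go ['@'] f 0 l [] [p]).headD [] = p := by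
  cases f with
  | zero => simp [PySem.Chars.splitOnMax.go]
  | succ g => cases l <;> simp [PySem.Chars.splitOnMax.go]

lemma splitOnMax_go_head (l : List Char) : ∀ (f : Nat) (cur : List Char),
    '@' ∈ l → l.length < f →
    (PySem.Chars.splitOnMax.go ['@'] f 1 l cur []).headD []
      = cur.reverse ++ l.takeWhile (fun c => !(c == '@')) := by
  induction l with
  | nil => intro f cur h; simp at h
  | cons c rest ih =>
      intro f cur hmem hlen
      cases f with
      | zero => omega
      | succ g =>
          by_cases hc : c = '@'
          · subst hc
            have hpre : List.isPrefixOf ['@'] ('@' :: rest) = true := by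
              simp [List.isPrefixOf]
            simp only [PySem.Chars.splitOnMax.go, hpre, if_true]
            rw [if_neg (by decide : ¬ (1 : Nat) = 0)]
            have hd1 : List.drop (['@'] : List Char).length ('@' :: rest) = rest := rfl
            rw [hd1, show (1 : Nat) - 1 = 0 from rfl, splitOnMax_go_zero g rest cur.reverse]
            simp [List.takeWhile]
          · have hpre : List.isPrefixOf ['@'] (c :: rest) = false := by
              simp [List.isPrefixOf]
              exact fun h => absurd h.symm hc
            have hmem' : '@' ∈ rest := by
              rcases List.mem_cons.1 hmem with h | h
              · exact absurd h.symm hc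
              · exact h
            simp only [PySem.Chars.splitOnMax.go, hpre, Bool.false_eq_true, if_false]
            rw [if_neg (by decide : ¬ (1 : Nat) = 0)]
            rw [ih g (c :: cur) hmem' (by simpa using Nat.lt_of_succ_lt_succ hlen)]
            have h2 : (c == '@') = false := by simpa using hc
            simp [List.takeWhile, h2]

lemma takeWhile_before_at (suf : List Char) : ∀ (pre : List Char), '@' ∉ pre →
    (pre ++ '@' :: suf).takeWhile (fun c => !(c == '@')) = pre := by
  intro pre
  induction pre with
  | nil => intro _; simp
  | cons x t ih =>
      intro hx
      have hx1 : ¬ (x = '@') := fun h => hx (by simp [h])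
      have hx2 : '@' ∉ t := fun h => hx (by simp [h])
      simp only [List.cons_append, List.takeWhile]
      have : (!(x == '@')) = true := by simpa using fun h => hx1 h
      rw [this]
      simp only []
      rw [ih hx2]

lemma seed_eq (email phone_number : Option String) :
    (if (match email with
        | some e => (!(e == "")) && PySem.Str.isIn "@" e
        | none => false) then
      (PySem.Chars.splitOnMax (email.getD "").toList ['@'] 1).headD []
    else if (match phone_number with
        | some p => !(p == "")
        | none => false) then
      (phone_number.getD "").toList
    else "driver".toList)
      = pvSeedB email phone_number := by
  have hphone : (if (match phone_number with
        | some p => !(p == "")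
        | none => false) then (phone_number.getD "").toList else "driver".toList)
      = pvSeedPhone phone_number := by
    cases phone_number with
    | none => simp [pvSeedPhone]
    | some p =>
        by_cases hp : p = ""
        · subst hp; simp [pvSeedPhone]
        · have h1 : (p == "") = false := by simpa using hp
          simp [pvSeedPhone, h1, String.toList_eq_nil_iff, hp]
  cases email with
  | none => simpa [pvSeedB] using hphone
  | some e =>
      by_cases he : e = ""
      · subst he
        simpa [pvSeedB] using hphone
      · have hne : (e == "") = false := by simpa using he
        have hnel : e.toList ≠ [] := fun h => he (String.toList_eq_nil_iff.mp h)
        by_cases hin : '@' ∈ e.toList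
        · -- both take the part of e before the first '@'
          have hIn : PySem.Chars.isIn ['@'] e.toList = true :=
            (PySem.Chars.isIn_iff_infix ['@'] e.toList).2
              ((List.singleton_infix_iff '@' e.toList).2 hin)
          obtain ⟨k, hk⟩ := Option.isSome_iff_exists.mp
            ((PySem.List.index?_isSome_iff e.toList '@').2 hin)
          obtain ⟨pre, suf, hsplit, hklen, hpre⟩ :=
            (PySem.List.index?_eq_some_iff e.toList '@' k).1 hk
          have hcond : (match (some e : Option String) with
              | some e => (!(e == "")) && PySem.Str.isIn "@" e
              | none => false) = true := by
            simp [hne, hIn]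
          rw [if_pos hcond]
          have hA : (PySem.Chars.splitOnMax ((some e : Option String).getD "").toList
              ['@'] 1).headD [] = pre := by
            simp only [Option.getD_some]
            have hgo : PySem.Chars.splitOnMax e.toList ['@'] 1
                = PySem.Chars.splitOnMax.go ['@'] (e.toList.length + 1) 1 e.toList [] [] := by
              simp [PySem.Chars.splitOnMax]
            rw [hgo, splitOnMax_go_head e.toList (e.toList.length + 1) [] hin (by omega)]
            rw [hsplit, takeWhile_before_at suf pre hpre]
            simp
          have hB : PySem.List.slice e.toList none
              (some (((PySem.List.index? e.toList '@').getD 0 : Nat) : Int)) = pre := by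
            rw [hk]
            simp only [Option.getD_some]
            rw [PySem.List.slice_to_natCast, hsplit, ← hklen, List.take_left]
          simp only [pvSeedB]
          rw [if_pos ⟨hnel, hin⟩, hA, hB]
        · have hIn : PySem.Chars.isIn ['@'] e.toList = false := by
            rw [Bool.eq_false_iff]
            intro h
            exact hin ((List.singleton_infix_iff '@' e.toList).1
              ((PySem.Chars.isIn_iff_infix ['@'] e.toList).1 h))
          have hcond : (match (some e : Option String) with
              | some e => (!(e == "")) && PySem.Str.isIn "@" e
              | none => false) = false := by
            simp [hIn]
          rw [hcond]
          simp only [Bool.false_eq_true, if_false]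
          simp only [pvSeedB]
          rw [if_neg (show ¬ (e.toList ≠ [] ∧ '@' ∈ e.toList) from fun h => hin h.2)]
          exact hphone

lemma pyCapitalize_eq_nil_iff (l : List Char) : pyCapitalize l = [] ↔ l = [] := by
  cases l <;> simp [pyCapitalize]

-- ===== VERDICT (by name: the statement is the Claim_ definition above) =====
theorem fallback_name_spec : Claim_equal_fallback_name := by
  intro email phone_number _
  unfold Spec_fallback_name fallback_name fallback_name_alt
  rw [seed_eq email phone_number]
  rw [core (pvSeedB email phone_number)]
  simp only []
  rw [runGo_capitalize (pvSeedB email phone_number)]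
  set run := ((pvSeedB email phone_number).dropWhile
      (fun c => !PySem.Chars.isalnum c)).takeWhile PySem.Chars.isalnum with hrun
  by_cases h : run = []
  · simp [h, pyCapitalize]
  · have h1 : run.isEmpty = false := by simpa [List.isEmpty_iff] using h
    have h2 : ¬ (pyCapitalize run = []) := fun hh => h ((pyCapitalize_eq_nil_iff run).1 hh)
    simp [h1, h2]
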